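-- pv_equiv track=rewrite | github.com/szbernadett/Algorithm_Tests | Alogrithms_test/graph_matrix.py | init_matrix
-- ===== SOURCE A (Python) =====
-- def init_matrix(graph: dict) -> list:
--
--     graph_nodes=list(graph.keys())
--     size=len(graph_nodes) + 1
--     matrix=[["" for x in range(size)] for y in range(size)]
--
--     for x in range(1, size):
--         matrix[0][x]=graph_nodes[x-1]
--         matrix[x][0]=graph_nodes[x-1]
--
--     return matrix
-- ===== SOURCE B (Python) =====
-- def init_matrix(graph: dict) -> list:
--     matrix = [[""]]
--     for node in graph:
--         matrix[0].append(node)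
--         for row in matrix[1:]:
--             row.append("")
--         matrix.append([node] + [""] * (len(matrix[0]) - 1))
--     return matrix
-- ===== Notes on version B (the rewrite author's own statement) =====
-- stated objective: alternative
-- what changed: B grows the matrix incrementally node by node from a 1x1 matrix with a single empty cell — for each node it appends the node to the header row, appends an empty cell to every existing data row and appends a new labeled row — instead of A's allocate-a-full-empty-grid-then-overwrite-first-row-and-column index loop.
import Mathlib
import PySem

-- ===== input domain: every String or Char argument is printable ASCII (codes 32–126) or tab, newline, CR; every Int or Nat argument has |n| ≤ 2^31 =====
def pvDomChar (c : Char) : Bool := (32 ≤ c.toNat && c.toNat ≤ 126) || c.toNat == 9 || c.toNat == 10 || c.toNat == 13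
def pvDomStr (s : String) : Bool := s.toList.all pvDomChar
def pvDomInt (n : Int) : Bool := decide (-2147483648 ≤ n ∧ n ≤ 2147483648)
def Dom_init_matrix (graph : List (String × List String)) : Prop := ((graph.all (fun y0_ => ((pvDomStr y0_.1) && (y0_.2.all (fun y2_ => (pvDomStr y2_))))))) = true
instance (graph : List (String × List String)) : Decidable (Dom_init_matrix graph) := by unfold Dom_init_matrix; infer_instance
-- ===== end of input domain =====

-- B grows the matrix incrementally node by node from a 1x1 single-empty-cell matrix (append the node to
-- the header, append "" to every data row, append a new labeled row) instead of allocating an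
-- empty full-size grid and overwriting the first row and column; same cost, alternative.

-- ===== PORT A =====
def init_matrix (graph : List (String × List String)) : List (List String) :=
  let graph_nodes := (PySem.Dict.ofList graph).keys
  let size : Nat := graph_nodes.length + 1
  let matrix := (List.range size).map (fun _ => (List.range size).map (fun _ => ("" : String)))
  (PySem.List.pyRange 1 (size : Int) 1).foldl
    (fun m x =>
      -- matrix[0][x] = graph_nodes[x-1]
      let m1 := m.set 0 ((m.getD 0 []).set x.toNat (PySem.List.pyGetD graph_nodes (x - 1) ""))
      -- matrix[x][0] = graph_nodes[x-1]
      m1.set x.toNat ((m1.getD x.toNat []).set 0 (PySem.List.pyGetD graph_nodes (x - 1) "")))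
    matrix

-- ===== PORT B =====
-- the loop body: matrix[0] → pyGetD m 0 [] (index never out of range), list.append → ++ [x],
-- the slice matrix[1:] → List.drop 1 (exact for nonnegative start 1).
def pvStep (m : List (List String)) (node : String) : List (List String) :=
  let m0 := (PySem.List.pyGetD m 0 []) ++ [node]
  let rows := (m.drop 1).map (fun row => row ++ [""])
  let newRow := node :: List.replicate (m0.length - 1) ""
  (m0 :: rows) ++ [newRow]

def init_matrix_alt (graph : List (String × List String)) : List (List String) :=
  (PySem.Dict.ofList graph).keys.foldl pvStep [[""]]

-- ===== PRECONDITION & SPEC =====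
def Spec_init_matrix (graph : List (String × List String)) (out : List (List String)) : Prop := out = init_matrix_alt graph
instance (graph : List (String × List String)) (out : List (List String)) : Decidable (Spec_init_matrix graph out) := by unfold Spec_init_matrix; infer_instance

-- ===== CLAIM (what is proved, stated in full; the proofs are below) =====
def Claim_equal_init_matrix : Prop := ∀ (graph : List (String × List String)), Dom_init_matrix graph → Spec_init_matrix graph (init_matrix graph)

-- ===== LEMMAS AND PROOFS =====

-- B's grow loop carries the full labeled matrix of the processed prefix as its invariant.
def bState (p : List String) : List (List String) :=
  ("" :: p) :: p.map (fun node => node :: List.replicate p.length "")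

theorem bStep_eq (p : List String) (a : String) : pvStep (bState p) a = bState (p ++ [a]) := by
  simp only [pvStep, bState, PySem.List.pyGetD]
  norm_num
  intro x _
  simp [List.replicate_succ']

theorem bLoop_eq (l p : List String) :
    l.foldl pvStep (bState p) = bState (p ++ l) := by
  induction l generalizing p with
  | nil => simp
  | cons a t ih =>
    rw [List.foldl_cons, bStep_eq, ih]
    simp

theorem pvBuild_eq (nodes : List String) :
    nodes.foldl pvStep [[""]]
      = ("" :: nodes) :: nodes.map (fun node => node :: List.replicate nodes.length "") := by
  have h := bLoop_eq nodes []
  simpa [bState] using h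

-- the state of A's fill loop after processing indices 1..k
def aState (nodes : List String) (k : Nat) : List (List String) :=
  ("" :: (nodes.take k ++ List.replicate (nodes.length - k) "")) ::
    (List.range nodes.length).map
      (fun i => (if i < k then nodes.getD i "" else "") :: List.replicate nodes.length "")

theorem aLoop_inv (nodes : List String) :
    ∀ k : Nat, k ≤ nodes.length →
      (PySem.List.pyRange 1 ((k : Int) + 1) 1).foldl
        (fun m x =>
          let m1 := m.set 0 ((m.getD 0 []).set x.toNat (PySem.List.pyGetD nodes (x - 1) ""))
          m1.set x.toNat ((m1.getD x.toNat []).set 0 (PySem.List.pyGetD nodes (x - 1) "")))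
        ((List.range (nodes.length + 1)).map
          (fun _ => (List.range (nodes.length + 1)).map (fun _ => ("" : String))))
        = aState nodes k := by
  intro k
  induction k with
  | zero =>
    intro _
    rw [PySem.List.pyRange_one_eq_nil (by norm_num)]
    simp [aState, List.map_const', List.replicate_succ]
  | succ k ih =>
    intro hk
    have hk' : k ≤ nodes.length := Nat.le_of_succ_le hk
    have hklt : k < nodes.length := hk
    have hsplit : PySem.List.pyRange 1 (((k + 1 : Nat) : Int) + 1) 1
        = PySem.List.pyRange 1 ((k : Int) + 1) 1 ++ [(k : Int) + 1] := by
      push_cast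
      exact PySem.List.pyRange_one_succ_right (by omega)
    rw [hsplit, List.foldl_append, ih hk']
    simp only [List.foldl_cons, List.foldl_nil]
    have htoNat : ((k : Int) + 1).toNat = k + 1 := by omega
    have hget : PySem.List.pyGetD nodes ((k : Int) + 1 - 1) "" = nodes.getD k "" := by
      have : (k : Int) + 1 - 1 = (k : Int) := by ring
      rw [this, PySem.List.pyGetD_natCast]
    rw [htoNat, hget]
    -- unfold one step of the state update
    simp only [aState, List.getD_cons_zero, List.set_cons_zero, List.getD_cons_succ,
      List.set_cons_succ]
    congr 1
    · -- header row: writing cell k of the suffix extends the copied prefix by one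
      have hlen : (nodes.take k).length = k := by simp [hk']
      have h1 : nodes.length - k = (nodes.length - (k + 1)) + 1 := by omega
      rw [List.set_append_right _ _ (by omega), hlen, Nat.sub_self, h1,
        List.replicate_succ, List.set_cons_zero]
      have htake : List.take (k + 1) nodes = List.take k nodes ++ [nodes[k]] := by
        rw [List.take_add_one, List.getElem?_eq_getElem hklt]; rfl
      rw [htake, List.append_assoc, List.singleton_append, List.getD_eq_getElem _ _ hklt]
    · -- data rows: setting row k's label turns the if-bound from k into k+1
      have hrow : ((List.range nodes.length).map
            (fun i => (if i < k then nodes.getD i "" else "") :: List.replicate nodes.length "")).getD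
            k []
          = "" :: List.replicate nodes.length "" := by
        rw [List.getD_eq_getElem _ _ (by simpa using hklt)]
        simp
      rw [hrow, List.set_cons_zero]
      apply List.ext_getElem
      · simp
      · intro i h1 h2
        simp only [List.getElem_set, List.getElem_map, List.getElem_range] at *
        by_cases hik : k = i
        · subst hik; simp
        · have : (i < k) = (i < k + 1) := by
            simp only [eq_iff_iff]; omega
          simp [hik, this]

-- the final state of A's loop is exactly B's row list
theorem aState_final (nodes : List String) :
    aState nodes nodes.length
      = ("" :: nodes) :: nodes.map (fun node => node :: List.replicate nodes.length "") := by
  simp only [aState, Nat.sub_self, List.replicate_zero, List.append_nil, List.take_length]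
  congr 1
  apply List.ext_getElem
  · simp
  · intro i h1 h2
    simp only [List.getElem_map, List.getElem_range] at *
    have : i < nodes.length := by simpa using h1
    simp [this]

-- ===== VERDICT (by name: the statement is the Claim_ definition above) =====
theorem init_matrix_spec : Claim_equal_init_matrix := by
  intro graph _
  unfold Spec_init_matrix init_matrix init_matrix_alt
  rw [pvBuild_eq]
  have h := aLoop_inv ((PySem.Dict.ofList graph).keys)
    ((PySem.Dict.ofList graph).keys).length (le_refl _)
  simp only [Nat.cast_add, Nat.cast_one] at h ⊢
  rw [h, aState_final]
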